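-- pv_equiv track=rewrite | github.com/ryyyyan-taylor/csci2824 | HW3/check_proposition.py | check_proposition
-- ===== SOURCE A (Python) =====
-- def check_proposition(nums):
--
-- 	for x in nums:
--
-- 		if x % 2 == 0:
-- 			status = False
--
-- 			for y in nums:
--
-- 				if y * 2 == x:
-- 					status = True
-- 					break
--
-- 			if status == False : return False
-- 	return True
-- ===== SOURCE B (Python) =====
-- def check_proposition(nums):
--     need = {x for x in nums if x % 2 == 0}
--     for y in nums:
--         need.discard(y * 2)
--     return not need
-- ===== Notes on version B (the rewrite author's own statement) =====
-- stated objective: alternative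
-- what changed: Replaces the per-even inner scan with a set of unmatched even elements shrunk by a single discard pass over the doubling sources; trades A's early exit for a worst-case-linear set computation.
import Mathlib
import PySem

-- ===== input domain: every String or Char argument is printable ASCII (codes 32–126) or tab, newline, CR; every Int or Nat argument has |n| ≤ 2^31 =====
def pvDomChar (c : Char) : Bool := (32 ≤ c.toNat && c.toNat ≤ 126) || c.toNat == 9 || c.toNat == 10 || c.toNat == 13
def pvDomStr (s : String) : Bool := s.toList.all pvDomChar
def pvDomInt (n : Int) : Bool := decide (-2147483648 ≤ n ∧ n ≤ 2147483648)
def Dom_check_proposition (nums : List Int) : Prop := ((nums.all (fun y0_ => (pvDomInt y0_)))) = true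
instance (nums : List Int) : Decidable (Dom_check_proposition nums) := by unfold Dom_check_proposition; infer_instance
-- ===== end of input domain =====

-- B maintains a set of still-unmatched even elements shrunk by one discard pass (alternative decomposition; not claimed faster).

-- ===== PORT A =====
-- inner 'for y in nums: if y * 2 == x: status = True; break'
def cpInner (x : Int) : List Int → Bool
  | [] => false
  | y :: ys => if y * 2 = x then true else cpInner x ys

-- outer loop over nums, early 'return False' when an even x has no doubler
def cpOuter (nums : List Int) : List Int → Bool
  | [] => true
  | x :: xs =>
      if PySem.Int.mod x 2 = 0 then
        if cpInner x nums then cpOuter nums xs else false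
      else cpOuter nums xs

def check_proposition (nums : List Int) : Bool := cpOuter nums nums

-- ===== PORT B =====
def check_proposition_alt (nums : List Int) : Bool :=
  let need : PySem.Set Int := PySem.Set.ofList (nums.filter (fun x => decide (PySem.Int.mod x 2 = 0)))
  let rem : PySem.Set Int := nums.foldl (fun s y => PySem.Set.discard s (y * 2)) need
  rem.isEmpty

-- ===== PRECONDITION & SPEC =====
def Spec_check_proposition (nums : List Int) (out : Bool) : Prop := out = check_proposition_alt nums
instance (nums : List Int) (out : Bool) : Decidable (Spec_check_proposition nums out) := by unfold Spec_check_proposition; infer_instance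

-- ===== CLAIM (what is proved, stated in full; the proofs are below) =====
def Claim_equal_check_proposition : Prop := ∀ (nums : List Int), Dom_check_proposition nums → Spec_check_proposition nums (check_proposition nums)

-- ===== LEMMAS AND PROOFS =====

theorem cpInner_iff (x : Int) (l : List Int) : cpInner x l = true ↔ ∃ y ∈ l, y * 2 = x := by
  induction l with
  | nil => simp [cpInner]
  | cons y ys ih =>
    simp only [cpInner]
    by_cases h : y * 2 = x <;> simp [h, ih]

theorem cpOuter_iff (nums rest : List Int) :
    cpOuter nums rest = true ↔ ∀ x ∈ rest, PySem.Int.mod x 2 = 0 → cpInner x nums = true := by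
  induction rest with
  | nil => simp [cpOuter]
  | cons x xs ih =>
    simp only [cpOuter, List.mem_cons]
    by_cases h : PySem.Int.mod x 2 = 0
    · rw [if_pos h]
      by_cases h2 : cpInner x nums = true
      · rw [if_pos h2, ih]
        constructor
        · intro ha z hz he
          rcases hz with rfl | hz
          · exact h2
          · exact ha z hz he
        · intro ha z hz he
          exact ha z (Or.inr hz) he
      · rw [if_neg h2]
        constructor
        · intro hf
          exact absurd hf (by simp)
        · intro ha
          exact absurd (ha x (Or.inl rfl) h) h2
    · rw [if_neg h, ih]
      constructor
      · intro ha z hz he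
        rcases hz with rfl | hz
        · exact absurd he h
        · exact ha z hz he
      · intro ha z hz he
        exact ha z (Or.inr hz) he

theorem mem_foldl_discard (nums : List Int) (s : PySem.Set Int) (v : Int) :
    v ∈ nums.foldl (fun s y => PySem.Set.discard s (y * 2)) s ↔ v ∈ s ∧ ∀ z ∈ nums, v ≠ z * 2 := by
  induction nums generalizing s with
  | nil => simp
  | cons z zs ih =>
    simp only [List.foldl_cons, ih, PySem.Set.mem_discard, List.mem_cons]
    constructor
    · rintro ⟨⟨hs, hne⟩, hall⟩
      exact ⟨hs, fun w hw => hw.elim (fun e => e ▸ hne) (hall w)⟩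
    · rintro ⟨hs, hall⟩
      exact ⟨⟨hs, hall z (Or.inl rfl)⟩, fun w hw => hall w (Or.inr hw)⟩

-- ===== VERDICT (by name: the statement is the Claim_ definition above) =====
theorem check_proposition_spec : Claim_equal_check_proposition := by
  intro nums _
  show check_proposition nums = check_proposition_alt nums
  apply Bool.eq_iff_iff.mpr
  unfold check_proposition check_proposition_alt
  rw [cpOuter_iff, List.isEmpty_iff, List.eq_nil_iff_forall_not_mem]
  constructor
  · intro h v hv
    rw [mem_foldl_discard] at hv
    obtain ⟨hn, hall⟩ := hv
    rw [PySem.Set.mem_ofList, List.mem_filter] at hn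
    obtain ⟨hmem, hev⟩ := hn
    obtain ⟨y, hy, hyx⟩ := (cpInner_iff v nums).mp (h v hmem (by simpa using hev))
    exact hall y hy hyx.symm
  · intro h x hx hev
    by_contra hni
    apply h x
    rw [mem_foldl_discard]
    refine ⟨by rw [PySem.Set.mem_ofList, List.mem_filter]; exact ⟨hx, by simpa using hev⟩, ?_⟩
    intro z hz hxz
    exact hni ((cpInner_iff x nums).mpr ⟨z, hz, hxz.symm⟩)
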